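-- pv_equiv track=rewrite | github.com/sohn1029/File_Fragment_Type_Identification | make_feature.py | ASCII_Range_Freq
-- ===== SOURCE A (Python) =====
-- def ASCII_Range_Freq(x):
--     a = b = c = 0
--     for i in x:
--         if 0 <= i < 32 :
--             a += 1
--         elif 32 <= i < 128 :
--             b += 1
--         else:
--             c += 1
--     return a,b,c
-- ===== SOURCE B (Python) =====
-- from collections import Counter
--
-- def ASCII_Range_Freq(x):
--     cnt = Counter(x)
--     a = sum(v for k, v in cnt.items() if 0 <= k < 32)
--     b = sum(v for k, v in cnt.items() if 32 <= k < 128)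
--     c = sum(cnt.values()) - a - b
--     return a, b, c
-- ===== Notes on version B (the rewrite author's own statement) =====
-- stated objective: alternative
-- what changed: B tabulates value frequencies once in a Counter and sums the counts of distinct keys per range, getting the third bucket as the complement total - a - b, instead of A's per-element if/elif/else loop over three accumulators.
import Mathlib
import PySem

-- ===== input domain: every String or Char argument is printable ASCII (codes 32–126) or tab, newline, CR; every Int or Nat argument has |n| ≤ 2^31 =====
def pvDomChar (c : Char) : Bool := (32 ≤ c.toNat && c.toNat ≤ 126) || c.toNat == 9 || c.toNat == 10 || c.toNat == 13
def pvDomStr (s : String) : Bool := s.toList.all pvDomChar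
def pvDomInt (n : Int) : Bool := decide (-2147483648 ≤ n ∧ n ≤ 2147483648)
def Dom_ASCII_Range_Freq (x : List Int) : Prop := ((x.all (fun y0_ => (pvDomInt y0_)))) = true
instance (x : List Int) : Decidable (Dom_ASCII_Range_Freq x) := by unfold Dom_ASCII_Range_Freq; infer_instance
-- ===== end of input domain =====

-- B tabulates value frequencies once in a Counter and sums counts per range (third bucket by complement) instead of A's three-accumulator if/elif/else loop; alternative decomposition, same cost.

-- ===== PORT A =====
def ASCII_Range_Freq (x : List Int) : Int × Int × Int :=
  x.foldl (fun (acc : Int × Int × Int) i =>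
      if 0 ≤ i ∧ i < 32 then (acc.1 + 1, acc.2.1, acc.2.2)
      else if 32 ≤ i ∧ i < 128 then (acc.1, acc.2.1 + 1, acc.2.2)
      else (acc.1, acc.2.1, acc.2.2 + 1))
    (0, 0, 0)

-- ===== PORT B =====
def ASCII_Range_Freq_alt (x : List Int) : Int × Int × Int :=
  let cnt := PySem.Dict.counter x
  let a := ((cnt.items.filter (fun kv => decide (0 ≤ kv.1 ∧ kv.1 < 32))).map (·.2)).sum
  let b := ((cnt.items.filter (fun kv => decide (32 ≤ kv.1 ∧ kv.1 < 128))).map (·.2)).sum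
  let c := cnt.values.sum - a - b
  (a, b, c)

-- ===== PRECONDITION & SPEC =====
def Spec_ASCII_Range_Freq (x : List Int) (out : Int × Int × Int) : Prop := out = ASCII_Range_Freq_alt x
instance (x : List Int) (out : Int × Int × Int) : Decidable (Spec_ASCII_Range_Freq x out) := by unfold Spec_ASCII_Range_Freq; infer_instance

-- ===== CLAIM (what is proved, stated in full; the proofs are below) =====
def Claim_equal_ASCII_Range_Freq : Prop := ∀ (x : List Int), Dom_ASCII_Range_Freq x → Spec_ASCII_Range_Freq x (ASCII_Range_Freq x)

-- ===== LEMMAS AND PROOFS =====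

-- sum of the indicator of one point over a nodup list containing it
theorem sum_indicator_one (p : Int → Bool) (l : List Int) (y : Int)
    (hnd : l.Nodup) (hy : y ∈ l) :
    ((l.filter p).map (fun k => if k = y then (1 : Int) else 0)).sum
      = if p y = true then (1 : Int) else 0 := by
  induction l with
  | nil => cases hy
  | cons h t ih =>
    rcases List.nodup_cons.mp hnd with ⟨hh, hnt⟩
    rcases List.mem_cons.mp hy with rfl | hyt
    · have hz : ((t.filter p).map (fun k => if k = y then (1:Int) else 0)).sum = 0 := by
        apply List.sum_eq_zero
        intro a ha
        rcases List.mem_map.mp ha with ⟨k, hk, rfl⟩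
        have hkt : k ∈ t := List.mem_of_mem_filter hk
        have hne : k ≠ y := fun e => hh (e ▸ hkt)
        simp [hne]
      by_cases hp : p y = true
      · simp [List.filter_cons_of_pos hp, hz, hp]
      · simp [List.filter_cons_of_neg (by simpa using hp), hz, hp]
    · have hne : h ≠ y := fun e => hh (e ▸ hyt)
      by_cases hp : p h = true
      · simp [List.filter_cons_of_pos hp, hne, ih hnt hyt]
      · simp [List.filter_cons_of_neg (by simpa using hp), ih hnt hyt]

-- sum over distinct keys (filtered by p) of occurrence counts = countP p
theorem sum_filter_count (p : Int → Bool) (l xs : List Int)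
    (hnd : l.Nodup) (hcov : ∀ v ∈ xs, v ∈ l) :
    ((l.filter p).map (fun k => ((xs.count k : Int)))).sum = (xs.countP p : Int) := by
  induction xs with
  | nil => simp
  | cons y ys ih =>
    have hcov' : ∀ v ∈ ys, v ∈ l := fun v hv => hcov v (List.mem_cons_of_mem _ hv)
    have hy : y ∈ l := hcov y List.mem_cons_self
    have hsplit :
        ((l.filter p).map (fun k => (((y :: ys).count k : Int)))).sum
          = ((l.filter p).map (fun k => ((ys.count k : Int)))).sum
            + ((l.filter p).map (fun k => if k = y then (1:Int) else 0)).sum := by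
      rw [← List.sum_map_add]
      congr 1
      apply List.map_congr_left
      intro k hk
      rcases eq_or_ne k y with rfl | hky
      · rw [if_pos rfl]; push_cast [List.count_cons_self]; ring
      · rw [if_neg hky]
        simp only [List.count_cons]
        simp [Ne.symm hky]
    rw [hsplit, ih hcov', sum_indicator_one p l y hnd hy, List.countP_cons]
    by_cases hp : p y = true
    · rw [if_pos hp, if_pos hp]; push_cast; ring
    · rw [if_neg hp, if_neg hp]; push_cast; ring

-- A's loop characterised: three countP's
theorem portA_eq_countP (x : List Int) :
    ASCII_Range_Freq x =
      ((x.countP (fun i => decide (0 ≤ i ∧ i < 32)) : Int),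
       (x.countP (fun i => decide (32 ≤ i ∧ i < 128)) : Int),
       (x.countP (fun i => !(decide (0 ≤ i ∧ i < 32) || decide (32 ≤ i ∧ i < 128))) : Int)) := by
  unfold ASCII_Range_Freq
  suffices h : ∀ (acc : Int × Int × Int),
      x.foldl (fun (acc : Int × Int × Int) i =>
        if 0 ≤ i ∧ i < 32 then (acc.1 + 1, acc.2.1, acc.2.2)
        else if 32 ≤ i ∧ i < 128 then (acc.1, acc.2.1 + 1, acc.2.2)
        else (acc.1, acc.2.1, acc.2.2 + 1)) acc
      = (acc.1 + (x.countP (fun i => decide (0 ≤ i ∧ i < 32)) : Int),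
         acc.2.1 + (x.countP (fun i => decide (32 ≤ i ∧ i < 128)) : Int),
         acc.2.2 + (x.countP (fun i => !(decide (0 ≤ i ∧ i < 32) || decide (32 ≤ i ∧ i < 128))) : Int)) by
    rw [h (0,0,0)]; simp
  induction x with
  | nil => intro acc; simp
  | cons y ys ih =>
    intro acc
    simp only [List.foldl_cons, List.countP_cons, ih]
    by_cases h1 : 0 ≤ y ∧ y < 32
    · have h2 : ¬ (32 ≤ y ∧ y < 128) := by omega
      simp [h1, h2, Prod.ext_iff] <;> omega
    · by_cases h2 : 32 ≤ y ∧ y < 128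
      · simp [h1, h2, Prod.ext_iff] <;> omega
      · simp [h1, h2, Prod.ext_iff] <;> omega

-- the three buckets partition the list
theorem countP_partition (x : List Int) :
    x.countP (fun i => decide (0 ≤ i ∧ i < 32))
      + x.countP (fun i => decide (32 ≤ i ∧ i < 128))
      + x.countP (fun i => !(decide (0 ≤ i ∧ i < 32) || decide (32 ≤ i ∧ i < 128)))
      = x.length := by
  induction x with
  | nil => rfl
  | cons y ys ih =>
    by_cases h1 : 0 ≤ y ∧ y < 32
    · have h2 : ¬ (32 ≤ y ∧ y < 128) := by omega
      have h3 : ¬ ((y < 0 ∨ 32 ≤ y) ∧ (y < 32 ∨ 128 ≤ y)) := by omega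
      simp [List.countP_cons, h1, h2, h3] at ih ⊢; omega
    · by_cases h2 : 32 ≤ y ∧ y < 128
      · have h3 : ¬ ((y < 0 ∨ 32 ≤ y) ∧ (y < 32 ∨ 128 ≤ y)) := by omega
        simp [List.countP_cons, h1, h2, h3] at ih ⊢; omega
      · have h3 : (y < 0 ∨ 32 ≤ y) ∧ (y < 32 ∨ 128 ≤ y) := by omega
        simp [List.countP_cons, h1, h2, h3] at ih ⊢; omega

-- B's filtered item sums are countP's
theorem alt_sum_eq_countP (x : List Int) (p : Int → Bool) :
    (((PySem.Dict.counter x).items.filter (fun kv => p kv.1)).map (·.2)).sum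
      = (x.countP p : Int) := by
  rw [PySem.Dict.items_counter, List.filter_map, List.map_map]
  have h1 : ((fun kv : Int × Int => p kv.1) ∘ fun k => (k, (x.count k : Int))) = p := rfl
  have h2 : ((fun kv : Int × Int => kv.2) ∘ fun k => (k, (x.count k : Int)))
        = fun k => ((x.count k : Int)) := rfl
  rw [h1, h2]
  exact sum_filter_count p (PySem.Set.ofList x) x (PySem.Set.nodup_ofList x)
    (fun v hv => (PySem.Set.mem_ofList x v).mpr hv)

-- the counter's values sum to the length
theorem values_counter_sum (x : List Int) :
    (PySem.Dict.counter x).values.sum = (x.length : Int) := by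
  have h := alt_sum_eq_countP x (fun _ => true)
  simp only [List.filter_true, List.countP_true] at h
  have hv : (PySem.Dict.counter x).values
      = (PySem.Dict.counter x).items.map (·.2) := rfl
  rw [hv]
  exact h

-- ===== VERDICT (by name: the statement is the Claim_ definition above) =====
theorem ASCII_Range_Freq_spec : Claim_equal_ASCII_Range_Freq := by
  intro x _
  unfold Spec_ASCII_Range_Freq
  simp only [ASCII_Range_Freq_alt]
  rw [portA_eq_countP]
  have ha := alt_sum_eq_countP x (fun i => decide (0 ≤ i ∧ i < 32))
  have hb := alt_sum_eq_countP x (fun i => decide (32 ≤ i ∧ i < 128))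
  rw [ha, hb, values_counter_sum]
  have h := countP_partition x
  simp only [Prod.mk.injEq]
  refine ⟨trivial, trivial, ?_⟩
  omega
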